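-- pv_equiv track=rewrite | github.com/g-enesis/Algorithm_hub | Python/백준/Silver/1388. 바닥 장식/바닥 장식.py | count_planks
-- ===== SOURCE A (Python) =====
-- def count_planks(N, M, floor):
--     # 방문한 칸을 체크하는 배열
--     visited = [[False] * M for _ in range(N)]
--     count = 0
--
--     # 가로로 나무 판자 세기 ('-')
--     for i in range(N):
--         for j in range(M):
--             if floor[i][j] == '-' and not visited[i][j]:
--                 # 새로운 나무 판자 발견
--                 count += 1
--                 # 가로로 연속된 '-' 처리
--                 k = j
--                 while k < M and floor[i][k] == '-':
--                     visited[i][k] = True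
--                     k += 1
--
--     # 세로로 나무 판자 세기 ('|')
--     for i in range(N):
--         for j in range(M):
--             if floor[i][j] == '|' and not visited[i][j]:
--                 # 새로운 나무 판자 발견
--                 count += 1
--                 # 세로로 연속된 '|' 처리
--                 k = i
--                 while k < N and floor[k][j] == '|':
--                     visited[k][j] = True
--                     k += 1
--
--     return count
-- ===== SOURCE B (Python) =====
-- def _hstart(floor, i, j):
--     return floor[i][j] == '-' and (j == 0 or floor[i][j - 1] != '-')
--
-- def _vstart(floor, i, j):
--     return floor[i][j] == '|' and (i == 0 or floor[i - 1][j] != '|')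
--
-- def count_planks(N, M, floor):
--     count = 0
--     for i in range(N):
--         for j in range(M):
--             if _hstart(floor, i, j):
--                 count += 1
--             elif _vstart(floor, i, j):
--                 count += 1
--     return count
-- ===== Notes on version B (the rewrite author's own statement) =====
-- stated objective: simpler
-- what changed: Replaced the visited matrix and the two run-walking while-loops by a single stateless double loop that counts each plank once at its leading cell (horizontal start: '-' with no '-' to the left; vertical start: '|' with no '|' above).
import Mathlib
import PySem

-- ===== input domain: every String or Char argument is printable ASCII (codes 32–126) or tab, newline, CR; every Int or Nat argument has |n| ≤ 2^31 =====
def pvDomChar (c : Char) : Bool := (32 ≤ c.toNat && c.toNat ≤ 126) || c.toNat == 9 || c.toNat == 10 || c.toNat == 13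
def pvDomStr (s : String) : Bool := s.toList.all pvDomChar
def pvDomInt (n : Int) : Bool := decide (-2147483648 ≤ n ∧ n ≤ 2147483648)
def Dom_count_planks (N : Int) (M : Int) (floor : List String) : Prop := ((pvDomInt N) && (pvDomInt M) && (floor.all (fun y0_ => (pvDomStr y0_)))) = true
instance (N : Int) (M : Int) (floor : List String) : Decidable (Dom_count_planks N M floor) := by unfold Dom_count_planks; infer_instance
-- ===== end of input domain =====

-- B drops A's visited matrix and run-walking while-loops: it counts each plank once at its
-- leading cell in a single stateless double loop (simpler, O(1) extra space; same return value).

-- ===== PORT A =====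
-- floor[i][j] (indices in range under Pre_; default padding only outside it)
def pvGet (fl : List String) (i j : Nat) : Char :=
  ((fl.getD i "").toList.getD j ' ')

-- visited[i][j]
def pvGet2 (v : List (List Bool)) (i j : Nat) : Bool := (v.getD i []).getD j false

-- row[j] = True
def setAt : List Bool → Nat → List Bool
  | [], _ => []
  | _ :: t, 0 => true :: t
  | b :: t, k+1 => b :: setAt t k

-- visited[i][j] = True
def setAt2 : List (List Bool) → Nat → Nat → List (List Bool)
  | [], _, _ => []
  | row :: t, 0, j => setAt row j :: t
  | row :: t, i+1, j => row :: setAt2 t i j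

-- while k < M and floor[i][k] == '-': visited[i][k] = True; k += 1   (fuel = M - k)
def markH (fl : List String) (i : Nat) : Nat → Nat → List (List Bool) → List (List Bool)
  | _, 0, vis => vis
  | k, fuel+1, vis =>
      if pvGet fl i k = '-' then markH fl i (k+1) fuel (setAt2 vis i k) else vis

-- while k < N and floor[k][j] == '|': visited[k][j] = True; k += 1   (fuel = N - k)
def markV (fl : List String) (j : Nat) : Nat → Nat → List (List Bool) → List (List Bool)
  | _, 0, vis => vis
  | k, fuel+1, vis =>
      if pvGet fl k j = '|' then markV fl j (k+1) fuel (setAt2 vis k j) else vis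

-- body of the horizontal inner loop
def stepH (fl : List String) (m i : Nat) (s : List (List Bool) × Int) (j : Nat) :
    List (List Bool) × Int :=
  if pvGet fl i j = '-' ∧ pvGet2 s.1 i j = false then (markH fl i j (m - j) s.1, s.2 + 1) else s

-- body of the vertical inner loop
def stepV (fl : List String) (n i : Nat) (s : List (List Bool) × Int) (j : Nat) :
    List (List Bool) × Int :=
  if pvGet fl i j = '|' ∧ pvGet2 s.1 i j = false then (markV fl j i (n - i) s.1, s.2 + 1) else s

def rowH (fl : List String) (m : Nat) (s : List (List Bool) × Int) (i : Nat) :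
    List (List Bool) × Int :=
  (List.range m).foldl (stepH fl m i) s

def rowV (fl : List String) (n m : Nat) (s : List (List Bool) × Int) (i : Nat) :
    List (List Bool) × Int :=
  (List.range m).foldl (stepV fl n i) s

def count_planks (N : Int) (M : Int) (floor : List String) : Int :=
  let n := N.toNat
  let m := M.toNat
  -- visited = [[False] * M for _ in range(N)]
  let vis0 : List (List Bool) := (List.range n).map (fun _ => List.replicate m false)
  let s1 := (List.range n).foldl (rowH floor m) (vis0, 0)
  let s2 := (List.range n).foldl (rowV floor n m) s1
  s2.2

-- ===== PORT B =====
-- _hstart(floor, i, j)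
def hS (fl : List String) (i j : Nat) : Bool :=
  decide (pvGet fl i j = '-' ∧ (j = 0 ∨ ¬ pvGet fl i (j-1) = '-'))

-- _vstart(floor, i, j)
def vS (fl : List String) (i j : Nat) : Bool :=
  decide (pvGet fl i j = '|' ∧ (i = 0 ∨ ¬ pvGet fl (i-1) j = '|'))

def stepB (fl : List String) (i : Nat) (c : Int) (j : Nat) : Int :=
  if hS fl i j then c + 1 else if vS fl i j then c + 1 else c

def rowB (fl : List String) (m : Nat) (c : Int) (i : Nat) : Int :=
  (List.range m).foldl (stepB fl i) c

def count_planks_alt (N : Int) (M : Int) (floor : List String) : Int :=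
  (List.range N.toNat).foldl (rowB floor M.toNat) 0

-- ===== PRECONDITION & SPEC =====
-- Pre_ excludes exactly the inputs on which the Python A raises IndexError: a positive N×M
-- scan area that the grid does not cover (fewer than N rows, or a scanned row shorter than M).
def Pre_count_planks (N : Int) (M : Int) (floor : List String) : Prop :=
  0 < N → 0 < M → (N.toNat ≤ floor.length ∧ ∀ s ∈ floor.take N.toNat, M.toNat ≤ s.toList.length)
instance (N : Int) (M : Int) (floor : List String) : Decidable (Pre_count_planks N M floor) := by
  unfold Pre_count_planks; infer_instance

def pvWitness_count_planks : Int × Int × List String := (2, 3, ["--|", "|-|"])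

def Spec_count_planks (N : Int) (M : Int) (floor : List String) (out : Int) : Prop := out = count_planks_alt N M floor
instance (N : Int) (M : Int) (floor : List String) (out : Int) : Decidable (Spec_count_planks N M floor out) := by unfold Spec_count_planks; infer_instance

-- ===== CLAIM (what is proved, stated in full; the proofs are below) =====
def Claim_equal_count_planks : Prop := ∀ (N : Int) (M : Int) (floor : List String), Dom_count_planks N M floor → Pre_count_planks N M floor → Spec_count_planks N M floor (count_planks N M floor)

-- ===== LEMMAS AND PROOFS =====

-- generic contiguous-run predicate (both directions instantiate it)
def runB (g : Nat → Char) (ch : Char) (a b : Nat) : Bool :=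
  decide (∀ t, t < b + 1 → a ≤ t → g t = ch)

theorem runB_iff (g : Nat → Char) (ch : Char) (a b : Nat) :
    runB g ch a b = true ↔ ∀ t, t < b + 1 → a ≤ t → g t = ch := by
  simp [runB]

theorem runB_head {g : Nat → Char} {ch : Char} {a b : Nat}
    (h : runB g ch a b = true) (hab : a ≤ b) : g a = ch :=
  (runB_iff g ch a b).1 h a (by omega) le_rfl

theorem runB_shift {g : Nat → Char} {ch : Char} {a : Nat} (b : Nat) (ha : g a = ch) :
    runB g ch a b = runB g ch (a+1) b := by
  simp only [runB, decide_eq_decide]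
  constructor
  · intro h t ht hat; exact h t ht (by omega)
  · intro h t ht hat
    rcases Nat.eq_or_lt_of_le hat with rfl | hlt
    · exact ha
    · exact h t ht (by omega)

theorem runB_mono {g : Nat → Char} {ch : Char} {a b : Nat}
    (h : runB g ch a b = true) : runB g ch (a+1) b = true := by
  rw [runB_iff] at h ⊢
  intro t ht hat; exact h t ht (by omega)

theorem runB_self {g : Nat → Char} {ch : Char} {a : Nat} (ha : g a = ch) :
    runB g ch a a = true := by
  rw [runB_iff]; intro t ht hat
  have : t = a := by omega
  simpa [this] using ha

theorem runB_pair {g : Nat → Char} {ch : Char} {a : Nat} (hj : 0 < a) (ha : g a = ch) :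
    runB g ch (a-1) a = decide (g (a-1) = ch) := by
  by_cases h : g (a-1) = ch
  · simp only [h, decide_true]
    rw [runB_iff]; intro t ht hat
    rcases Nat.eq_or_lt_of_le hat with rfl | hlt
    · exact h
    · have : t = a := by omega
      simpa [this] using ha
  · simp only [h, decide_false]
    rw [← Bool.not_eq_true, runB_iff]
    intro hall; exact h (hall (a-1) (by omega) le_rfl)

-- wellformedness of the visited matrix
def Shape (n m : Nat) (vis : List (List Bool)) : Prop :=
  vis.length = n ∧ ∀ row ∈ vis, row.length = m

-- the visited matrix realises a boolean formula on coordinates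
def VisEq (n m : Nat) (vis : List (List Bool)) (φ : Nat → Nat → Bool) : Prop :=
  ∀ k c, pvGet2 vis k c = (decide (k < n) && (decide (c < m) && φ k c))

theorem visEq_congr {n m : Nat} {vis : List (List Bool)} {φ ψ : Nat → Nat → Bool}
    (h : VisEq n m vis φ) (hφ : ∀ k c, k < n → c < m → φ k c = ψ k c) :
    VisEq n m vis ψ := by
  intro k c
  rw [h k c]
  by_cases hk : k < n
  · by_cases hc : c < m
    · simp [hk, hc, hφ k c hk hc]
    · simp [hc]
  · simp [hk]

theorem setAt_length (row : List Bool) (j : Nat) : (setAt row j).length = row.length := by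
  induction row generalizing j with
  | nil => rfl
  | cons b t ih => cases j with
    | zero => rfl
    | succ k => simp [setAt, ih]

theorem setAt2_length (vis : List (List Bool)) (i j : Nat) :
    (setAt2 vis i j).length = vis.length := by
  induction vis generalizing i with
  | nil => rfl
  | cons row t ih => cases i with
    | zero => rfl
    | succ i' => simp [setAt2, ih]

theorem setAt2_rows {m : Nat} {vis : List (List Bool)} (h : ∀ row ∈ vis, row.length = m)
    (i j : Nat) : ∀ row ∈ setAt2 vis i j, row.length = m := by
  induction vis generalizing i with
  | nil => intro r hr; simp [setAt2] at hr
  | cons row t ih =>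
    cases i with
    | zero =>
      intro r hr
      rcases (by simpa [setAt2] using hr : r = setAt row j ∨ r ∈ t) with rfl | hm
      · rw [setAt_length]; exact h row (by simp)
      · exact h r (by simp [hm])
    | succ i' =>
      intro r hr
      rcases (by simpa [setAt2] using hr : r = row ∨ r ∈ setAt2 t i' j) with rfl | hm
      · exact h r (by simp)
      · exact ih (fun r' hm' => h r' (by simp [hm'])) i' r hm

theorem setAt2_shape {n m : Nat} {vis : List (List Bool)} (h : Shape n m vis) (i j : Nat) :
    Shape n m (setAt2 vis i j) :=
  ⟨by rw [setAt2_length, h.1], setAt2_rows h.2 i j⟩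

theorem getD_setAt {row : List Bool} {j : Nat} (hj : j < row.length) (c : Nat) :
    (setAt row j).getD c false = if c = j then true else row.getD c false := by
  induction row generalizing j c with
  | nil => simp at hj
  | cons b t ih =>
    cases j with
    | zero =>
      cases c with
      | zero => simp [setAt]
      | succ c' => simp [setAt]
    | succ j' =>
      cases c with
      | zero => simp [setAt]
      | succ c' =>
        simp only [setAt, List.getD_cons_succ]
        rw [ih (by simpa using hj) c']
        simp

theorem get2_setAt2 {vis : List (List Bool)} {i j : Nat}
    (hi : i < vis.length) (hj : ∀ row ∈ vis, j < row.length) (k c : Nat) :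
    pvGet2 (setAt2 vis i j) k c =
      if k = i ∧ c = j then true else pvGet2 vis k c := by
  induction vis generalizing i k with
  | nil => simp at hi
  | cons row t ih =>
    cases i with
    | zero =>
      cases k with
      | zero =>
        simp only [setAt2, pvGet2, List.getD_cons_zero]
        rw [getD_setAt (hj row (by simp)) c]
        simp
      | succ k' => simp [setAt2, pvGet2]
    | succ i' =>
      cases k with
      | zero => simp [setAt2, pvGet2]
      | succ k' =>
        simp only [setAt2, pvGet2, List.getD_cons_succ]
        have := ih (i := i') (by simpa using hi)
          (fun r hm => hj r (by simp [hm])) k'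
        simpa [pvGet2] using this
theorem markH_shape {fl : List String} {n m : Nat} (i : Nat) :
    ∀ (fuel k : Nat) (vis : List (List Bool)), Shape n m vis →
      Shape n m (markH fl i k fuel vis) := by
  intro fuel
  induction fuel with
  | zero => intro k vis h; exact h
  | succ f ih =>
    intro k vis h
    simp only [markH]
    split
    · exact ih (k+1) _ (setAt2_shape h i k)
    · exact h

theorem markV_shape {fl : List String} {n m : Nat} (j : Nat) :
    ∀ (fuel k : Nat) (vis : List (List Bool)), Shape n m vis →
      Shape n m (markV fl j k fuel vis) := by
  intro fuel
  induction fuel with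
  | zero => intro k vis h; exact h
  | succ f ih =>
    intro f' vis h
    simp only [markV]
    split
    · exact ih (f'+1) _ (setAt2_shape h f' j)
    · exact h

theorem markH_get {fl : List String} {n m i : Nat} (hin : i < n) :
    ∀ (fuel k : Nat) (vis : List (List Bool)), Shape n m vis → k + fuel = m →
      ∀ k' c', pvGet2 (markH fl i k fuel vis) k' c' =
        if k' = i ∧ k ≤ c' ∧ c' < m ∧ runB (pvGet fl i) '-' k c' = true then true
        else pvGet2 vis k' c' := by
  intro fuel
  induction fuel with
  | zero =>
    intro k vis hs hkm k' c'
    simp only [markH]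
    rw [if_neg]; rintro ⟨-, h1, h2, -⟩; omega
  | succ f ih =>
    intro k vis hs hkm k' c'
    simp only [markH]
    by_cases hc : pvGet fl i k = '-'
    · rw [if_pos hc]
      rw [ih (k+1) (setAt2 vis i k) (setAt2_shape hs i k) (by omega) k' c']
      have hset := get2_setAt2 (vis := vis) (i := i) (j := k)
        (by rw [hs.1]; exact hin) (fun row hm => by rw [hs.2 row hm]; omega) k' c'
      by_cases h1 : k' = i ∧ k + 1 ≤ c' ∧ c' < m ∧ runB (pvGet fl i) '-' (k+1) c' = true
      · rw [if_pos h1, if_pos]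
        exact ⟨h1.1, by omega, h1.2.2.1, by rw [runB_shift c' hc]; exact h1.2.2.2⟩
      · rw [if_neg h1, hset]
        by_cases h2 : k' = i ∧ c' = k
        · rw [if_pos h2, if_pos]
          exact ⟨h2.1, by omega, by omega, by rw [h2.2]; exact runB_self hc⟩
        · rw [if_neg h2, if_neg]
          rintro ⟨rfl, hkc, hcm, hrun⟩
          rcases Nat.eq_or_lt_of_le hkc with heq | hlt
          · exact h2 ⟨rfl, heq.symm⟩
          · exact h1 ⟨rfl, by omega, hcm, by rw [← runB_shift c' hc]; exact hrun⟩
    · rw [if_neg hc, if_neg]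
      rintro ⟨-, hkc, -, hrun⟩
      exact hc (runB_head hrun hkc)

theorem markV_get {fl : List String} {n m j : Nat} (hjm : j < m) :
    ∀ (fuel k : Nat) (vis : List (List Bool)), Shape n m vis → k + fuel = n →
      ∀ k' c', pvGet2 (markV fl j k fuel vis) k' c' =
        if c' = j ∧ k ≤ k' ∧ k' < n ∧ runB (fun t => pvGet fl t j) '|' k k' = true then true
        else pvGet2 vis k' c' := by
  intro fuel
  induction fuel with
  | zero =>
    intro k vis hs hkm k' c'
    simp only [markV]
    rw [if_neg]; rintro ⟨-, h1, h2, -⟩; omega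
  | succ f ih =>
    intro k vis hs hkm k' c'
    simp only [markV]
    by_cases hc : pvGet fl k j = '|'
    · rw [if_pos hc]
      rw [ih (k+1) (setAt2 vis k j) (setAt2_shape hs k j) (by omega) k' c']
      have hset := get2_setAt2 (vis := vis) (i := k) (j := j)
        (by rw [hs.1]; omega) (fun row hm => by rw [hs.2 row hm]; omega) k' c'
      by_cases h1 : c' = j ∧ k + 1 ≤ k' ∧ k' < n ∧ runB (fun t => pvGet fl t j) '|' (k+1) k' = true
      · rw [if_pos h1, if_pos]
        exact ⟨h1.1, by omega, h1.2.2.1, by rw [runB_shift (g := fun t => pvGet fl t j) k' hc]; exact h1.2.2.2⟩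
      · rw [if_neg h1, hset]
        by_cases h2 : k' = k ∧ c' = j
        · rw [if_pos h2, if_pos]
          exact ⟨h2.2, by omega, by omega, by rw [h2.1]; exact runB_self hc⟩
        · rw [if_neg h2, if_neg]
          rintro ⟨hcj, hkc, hcm, hrun⟩
          rcases Nat.eq_or_lt_of_le hkc with heq | hlt
          · exact h2 ⟨heq.symm, hcj⟩
          · rw [runB_shift (g := fun t => pvGet fl t j) k' hc] at hrun
            exact h1 ⟨hcj, by omega, hcm, hrun⟩
    · rw [if_neg hc, if_neg]
      rintro ⟨-, hkc, -, hrun⟩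
      exact hc (runB_head (g := fun t => pvGet fl t j) hrun hkc)
theorem runB_false_of_mem {g : Nat → Char} {ch : Char} {a b t0 : Nat}
    (h1 : a ≤ t0) (h2 : t0 ≤ b) (hne : ¬ g t0 = ch) : runB g ch a b = false := by
  rw [← Bool.not_eq_true, runB_iff]
  intro hall; exact hne (hall t0 (by omega) h1)

-- count of horizontal starts in row i, columns j … j+len-1
def HsumRow (fl : List String) (i : Nat) : Nat → Nat → Int
  | _, 0 => 0
  | j, len+1 => (if hS fl i j then 1 else 0) + HsumRow fl i (j+1) len

-- count of vertical starts in row i, columns j … j+len-1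
def VsumRow (fl : List String) (i : Nat) : Nat → Nat → Int
  | _, 0 => 0
  | j, len+1 => (if vS fl i j then 1 else 0) + VsumRow fl i (j+1) len

def HsumRows (fl : List String) (m : Nat) : Nat → Nat → Int
  | _, 0 => 0
  | i, len+1 => HsumRow fl i 0 m + HsumRows fl m (i+1) len

def VsumRows (fl : List String) (m : Nat) : Nat → Nat → Int
  | _, 0 => 0
  | i, len+1 => VsumRow fl i 0 m + VsumRows fl m (i+1) len

-- visited-matrix formula while the horizontal pass is inside row i, about to look at column j
def hPhi (fl : List String) (ψ : Nat → Nat → Bool) (i j k c : Nat) : Bool :=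
  if k = i then
    (if c < j then decide (pvGet fl i c = '-')
     else decide (0 < j) && runB (pvGet fl i) '-' (j-1) c)
  else ψ k c

-- visited-matrix formula after the horizontal pass has finished rows 0 … i-1
def rowsPhi (fl : List String) (i k c : Nat) : Bool :=
  decide (k < i) && decide (pvGet fl k c = '-')

theorem hS_false_of_ndash {fl : List String} {i j : Nat} (hd : ¬ pvGet fl i j = '-') :
    hS fl i j = false := by simp [hS, hd]

theorem hS_false_of_cont {fl : List String} {i j : Nat} (hj : 0 < j)
    (hb2 : pvGet fl i (j-1) = '-') : hS fl i j = false := by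
  simp [hS, hb2]; omega

theorem hS_true_of_start {fl : List String} {i j : Nat} (hd : pvGet fl i j = '-')
    (h : j = 0 ∨ ¬ pvGet fl i (j-1) = '-') : hS fl i j = true := by
  simp [hS, hd]; tauto

theorem hPhi_next_skip {fl : List String} {ψ : Nat → Nat → Bool} {i j : Nat}
    (hd : ¬ pvGet fl i j = '-') (k c : Nat) :
    hPhi fl ψ i j k c = hPhi fl ψ i (j+1) k c := by
  by_cases hk : k = i
  · rcases Nat.lt_trichotomy c j with hc | hc | hc
    · simp [hPhi, hk, hc, show c < j + 1 from by omega]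
    · have h1 : ¬ j < j := by omega
      have h2 : j < j + 1 := by omega
      have h3 : runB (pvGet fl i) '-' (j-1) j = false :=
        runB_false_of_mem (t0 := j) (by omega) (by omega) hd
      simp [hPhi, hk, hc, h2, h3, hd]
    · have h1 : ¬ c < j := by omega
      have h2 : ¬ c < j + 1 := by omega
      have h3 : runB (pvGet fl i) '-' (j-1) c = false :=
        runB_false_of_mem (t0 := j) (by omega) (by omega) hd
      have h4 : runB (pvGet fl i) '-' j c = false :=
        runB_false_of_mem (t0 := j) (by omega) (by omega) hd
      simp [hPhi, hk, h1, h2, h3, h4]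
  · simp [hPhi, hk]

theorem hPhi_next_cont {fl : List String} {ψ : Nat → Nat → Bool} {i j : Nat}
    (hd : pvGet fl i j = '-') (hj : 0 < j) (hb2 : pvGet fl i (j-1) = '-') (k c : Nat) :
    hPhi fl ψ i j k c = hPhi fl ψ i (j+1) k c := by
  have hjj : j - 1 + 1 = j := by omega
  by_cases hk : k = i
  · rcases Nat.lt_trichotomy c j with hc | hc | hc
    · simp [hPhi, hk, hc, show c < j + 1 from by omega]
    · have h1 : ¬ j < j := by omega
      have h2 : j < j + 1 := by omega
      have h3 : runB (pvGet fl i) '-' (j-1) j = true := by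
        rw [runB_shift j hb2, hjj]; exact runB_self hd
      simp [hPhi, hk, hc, h2, h3, hd, hj]
    · have h1 : ¬ c < j := by omega
      have h2 : ¬ c < j + 1 := by omega
      have h3 : runB (pvGet fl i) '-' (j-1) c = runB (pvGet fl i) '-' j c := by
        rw [runB_shift c hb2, hjj]
      simp [hPhi, hk, h1, h2, h3, hj]
  · simp [hPhi, hk]
theorem hpass_inner (fl : List String) {n m i : Nat} (ψ : Nat → Nat → Bool) (hin : i < n) :
    ∀ (len j : Nat) (vis : List (List Bool)) (c : Int), j + len = m → Shape n m vis →
      VisEq n m vis (hPhi fl ψ i j) →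
      Shape n m ((List.range' j len).foldl (stepH fl m i) (vis, c)).1 ∧
      VisEq n m ((List.range' j len).foldl (stepH fl m i) (vis, c)).1 (hPhi fl ψ i m) ∧
      ((List.range' j len).foldl (stepH fl m i) (vis, c)).2 = c + HsumRow fl i j len := by
  intro len
  induction len with
  | zero =>
    intro j vis c hjm hs hv
    have hj : j = m := by omega
    subst hj
    simpa [HsumRow] using ⟨hs, hv⟩
  | succ len ih =>
    intro j vis c hjm hs hv
    have hjlt : j < m := by omega
    have hrange : List.range' j (len+1) = j :: List.range' (j+1) len := List.range'_succ ..
    rw [hrange, List.foldl_cons]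
    have hbit : pvGet2 vis i j = (decide (0 < j) && runB (pvGet fl i) '-' (j-1) j) := by
      rw [hv i j]
      simp [hPhi, hin, hjlt]
    by_cases hd : pvGet fl i j = '-'
    · by_cases hb : (decide (0 < j) && runB (pvGet fl i) '-' (j-1) j) = true
      · -- run continues from the left: A skips the cell, B sees no start
        have hstep : stepH fl m i (vis, c) j = (vis, c) := by
          unfold stepH
          rw [if_neg]; rintro ⟨-, h2⟩; rw [hbit, hb] at h2; simp at h2
        rw [hstep]
        have hb' := hb
        simp only [Bool.and_eq_true, decide_eq_true_eq] at hb'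
        obtain ⟨hj0', hrun⟩ := hb'
        have hb2 : pvGet fl i (j-1) = '-' := runB_head hrun (by omega)
        have hnext := visEq_congr hv (fun k c _ _ => hPhi_next_cont hd hj0' hb2 k c)
        have hmain := ih (j+1) vis c (by omega) hs hnext
        refine ⟨hmain.1, hmain.2.1, ?_⟩
        rw [hmain.2.2]
        simp [HsumRow, hS_false_of_cont hj0' hb2]
      · -- a new horizontal plank starts here
        have hvisj : pvGet2 vis i j = false := by rw [hbit]; exact Bool.eq_false_iff.mpr hb
        have hstep : stepH fl m i (vis, c) j = (markH fl i j (m - j) vis, c + 1) := by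
          unfold stepH; rw [if_pos ⟨hd, hvisj⟩]
        rw [hstep, show m - j = len + 1 from by omega]
        have hs' : Shape n m (markH fl i j (len+1) vis) := markH_shape i (len+1) j vis hs
        have hget := markH_get (fl := fl) hin (len+1) j vis hs (by omega)
        have hv' : VisEq n m (markH fl i j (len+1) vis) (hPhi fl ψ i (j+1)) := by
          intro k c'
          rw [hget k c']
          by_cases hcond : k = i ∧ j ≤ c' ∧ c' < m ∧ runB (pvGet fl i) '-' j c' = true
          · rw [if_pos hcond]
            obtain ⟨hk, hjc, hcm, hrun⟩ := hcond
            have hval : hPhi fl ψ i (j+1) k c' = true := by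
              rcases Nat.eq_or_lt_of_le hjc with heq | hlt
              · simp [hPhi, hk, ← heq, hd]
              · simp [hPhi, hk, show ¬ c' < j + 1 from by omega, hrun]
            rw [hk] at hval
            simp [hval, hk, hin, hcm]
          · rw [if_neg hcond, hv k c']
            by_cases hkn : k < n
            · by_cases hcm2 : c' < m
              · suffices h : hPhi fl ψ i j k c' = hPhi fl ψ i (j+1) k c' by rw [h]
                by_cases hk : k = i
                · rcases Nat.lt_trichotomy c' j with hc | hc | hc
                  · simp [hPhi, hk, hc, show c' < j + 1 from by omega]
                  · exact absurd ⟨hk, by omega, hcm2, by rw [hc]; exact runB_self hd⟩ hcond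
                  · have hrf : runB (pvGet fl i) '-' j c' = false := by
                      cases hr : runB (pvGet fl i) '-' j c'
                      · rfl
                      · exact absurd ⟨hk, by omega, hcm2, hr⟩ hcond
                    have h1 : ¬ c' < j := by omega
                    have h2 : ¬ c' < j + 1 := by omega
                    by_cases hj0 : 0 < j
                    · have hold : runB (pvGet fl i) '-' (j-1) c' = false := by
                        cases hr : runB (pvGet fl i) '-' (j-1) c'
                        · rfl
                        · have hmono := runB_mono hr
                          rw [show j - 1 + 1 = j from by omega] at hmono
                          rw [hmono] at hrf; simp at hrf
                      simp [hPhi, hk, h1, h2, hold, hrf]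
                    · simp [hPhi, hk, h1, h2, hrf, hj0]
                · simp [hPhi, hk]
              · simp [hcm2]
            · simp [hkn]
        have hmain := ih (j+1) _ (c+1) (by omega) hs' hv'
        refine ⟨hmain.1, hmain.2.1, ?_⟩
        rw [hmain.2.2]
        have hSt : hS fl i j = true := by
          apply hS_true_of_start hd
          rcases Nat.eq_zero_or_pos j with h0 | h0
          · exact Or.inl h0
          · refine Or.inr fun hcontra => hb ?_
            simp only [h0, decide_true, Bool.true_and]
            rw [runB_pair h0 hd]; simp [hcontra]
        simp [HsumRow, hSt]; ring
    · -- not a dash: A does nothing, B sees no horizontal start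
      have hstep : stepH fl m i (vis, c) j = (vis, c) := by
        unfold stepH; rw [if_neg]; rintro ⟨h1, -⟩; exact hd h1
      rw [hstep]
      have hnext := visEq_congr hv (fun k c _ _ => hPhi_next_skip hd k c)
      have hmain := ih (j+1) vis c (by omega) hs hnext
      refine ⟨hmain.1, hmain.2.1, ?_⟩
      rw [hmain.2.2]
      simp [HsumRow, hS_false_of_ndash hd]
theorem hpass_outer (fl : List String) {n m : Nat} :
    ∀ (len i : Nat) (vis : List (List Bool)) (c : Int), i + len = n → Shape n m vis →
      VisEq n m vis (rowsPhi fl i) →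
      Shape n m ((List.range' i len).foldl (rowH fl m) (vis, c)).1 ∧
      VisEq n m ((List.range' i len).foldl (rowH fl m) (vis, c)).1 (rowsPhi fl n) ∧
      ((List.range' i len).foldl (rowH fl m) (vis, c)).2 = c + HsumRows fl m i len := by
  intro len
  induction len with
  | zero =>
    intro i vis c hin hs hv
    have hi : i = n := by omega
    subst hi
    simpa [HsumRows] using ⟨hs, hv⟩
  | succ len ih =>
    intro i vis c hin hs hv
    have hilt : i < n := by omega
    have hrange : List.range' i (len+1) = i :: List.range' (i+1) len := List.range'_succ ..
    rw [hrange, List.foldl_cons,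
      show rowH fl m (vis, c) i = (List.range m).foldl (stepH fl m i) (vis, c) from rfl]
    have hv0 : VisEq n m vis (hPhi fl (rowsPhi fl i) i 0) := by
      refine visEq_congr hv ?_
      intro k c' _ _
      by_cases hk : k = i
      · simp [rowsPhi, hPhi, hk]
      · simp [hPhi, hk]
    have hrow := hpass_inner fl (rowsPhi fl i) hilt m 0 vis c (by omega) hs hv0
    have hv1 : VisEq n m ((List.range m).foldl (stepH fl m i) (vis, c)).1 (rowsPhi fl (i+1)) := by
      refine visEq_congr (by rw [List.range_eq_range']; exact hrow.2.1) ?_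
      intro k c' _ hcm
      by_cases hk : k = i
      · simp [hPhi, rowsPhi, hk, hcm]
      · have : (k < i) = (k < i + 1) := by
          apply propext; constructor <;> intro h <;> omega
        simp [hPhi, rowsPhi, hk, this]
    have hmain := ih (i+1) ((List.range m).foldl (stepH fl m i) (vis, c)).1
      ((List.range m).foldl (stepH fl m i) (vis, c)).2 (by omega)
      (by rw [List.range_eq_range']; exact hrow.1) hv1
    rw [Prod.mk.eta] at hmain
    refine ⟨hmain.1, hmain.2.1, ?_⟩
    rw [hmain.2.2]
    rw [show ((List.range m).foldl (stepH fl m i) (vis, c)).2 = c + HsumRow fl i 0 m from by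
      rw [List.range_eq_range']; exact hrow.2.2]
    simp [HsumRows]; ring
-- column formula: state of column c once its first p rows have been scanned by the vertical pass
def vPhiCol (fl : List String) (p k c : Nat) : Bool :=
  if k < p then decide (pvGet fl k c = '|')
  else decide (0 < p) && runB (fun t => pvGet fl t c) '|' (p-1) k

-- visited-matrix formula while the vertical pass is at row i, about to look at column j
def vPhi (fl : List String) (i j k c : Nat) : Bool :=
  decide (pvGet fl k c = '-') || vPhiCol fl (if c < j then i+1 else i) k c

theorem vS_false_of_npipe {fl : List String} {i j : Nat} (hd : ¬ pvGet fl i j = '|') :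
    vS fl i j = false := by simp [vS, hd]

theorem vS_false_of_cont {fl : List String} {i j : Nat} (hi : 0 < i)
    (hb2 : pvGet fl (i-1) j = '|') : vS fl i j = false := by
  simp [vS, hb2]; omega

theorem vS_true_of_start {fl : List String} {i j : Nat} (hd : pvGet fl i j = '|')
    (h : i = 0 ∨ ¬ pvGet fl (i-1) j = '|') : vS fl i j = true := by
  simp [vS, hd]; tauto

theorem vPhi_next_skip {fl : List String} {i j : Nat}
    (hd : ¬ pvGet fl i j = '|') (k c : Nat) :
    vPhi fl i j k c = vPhi fl i (j+1) k c := by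
  rcases Nat.lt_trichotomy c j with hc | hc | hc
  · simp [vPhi, hc, show c < j + 1 from by omega]
  · have hcj : (c < j) = False := by simp; omega
    have hcj1 : (c < j + 1) = True := by simp; omega
    rcases Nat.lt_trichotomy k i with hk | hk | hk
    · simp [vPhi, hcj, hcj1, vPhiCol, hk, show k < i + 1 from by omega]
    · subst hk
      have h3 : runB (fun t => pvGet fl t c) '|' (k-1) k = false := by
        rw [← hc] at hd
        exact runB_false_of_mem (t0 := k) (by omega) (by omega) hd
      rw [← hc] at hd
      simp [vPhi, hcj, hcj1, vPhiCol, h3, hd]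
    · have h3 : runB (fun t => pvGet fl t c) '|' (i-1) k = false := by
        rw [← hc] at hd
        exact runB_false_of_mem (t0 := i) (by omega) (by omega) hd
      have h4 : runB (fun t => pvGet fl t c) '|' i k = false := by
        rw [← hc] at hd
        exact runB_false_of_mem (t0 := i) (by omega) (by omega) hd
      simp [vPhi, hcj, hcj1, vPhiCol, show ¬ k < i from by omega,
        show ¬ k < i + 1 from by omega, h3, h4]
  · have hcj : (c < j) = False := by simp; omega
    have hcj1 : (c < j + 1) = False := by simp; omega
    simp [vPhi, hcj, hcj1]

theorem vPhi_next_cont {fl : List String} {i j : Nat}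
    (hd : pvGet fl i j = '|') (hi : 0 < i) (hb2 : pvGet fl (i-1) j = '|') (k c : Nat) :
    vPhi fl i j k c = vPhi fl i (j+1) k c := by
  have hii : i - 1 + 1 = i := by omega
  rcases Nat.lt_trichotomy c j with hc | hc | hc
  · simp [vPhi, hc, show c < j + 1 from by omega]
  · subst hc
    have hcj1 : (c < c + 1) = True := by simp
    rcases Nat.lt_trichotomy k i with hk | hk | hk
    · simp [vPhi, hcj1, vPhiCol, hk, show k < i + 1 from by omega]
    · subst hk
      have h3 : runB (fun t => pvGet fl t c) '|' (k-1) k = true := by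
        rw [runB_shift (g := fun t => pvGet fl t c) k hb2, hii]
        exact runB_self hd
      simp [vPhi, hcj1, vPhiCol, h3, hd, hi]
    · have h3 : runB (fun t => pvGet fl t c) '|' (i-1) k =
          runB (fun t => pvGet fl t c) '|' i k := by
        rw [runB_shift (g := fun t => pvGet fl t c) k hb2, hii]
      simp [vPhi, hcj1, vPhiCol, show ¬ k < i from by omega,
        show ¬ k < i + 1 from by omega, h3, hi]
  · have hcj : (c < j) = False := by simp; omega
    have hcj1 : (c < j + 1) = False := by simp; omega
    simp [vPhi, hcj, hcj1]
theorem vpass_inner (fl : List String) {n m i : Nat} (hin : i < n) :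
    ∀ (len j : Nat) (vis : List (List Bool)) (c : Int), j + len = m → Shape n m vis →
      VisEq n m vis (vPhi fl i j) →
      Shape n m ((List.range' j len).foldl (stepV fl n i) (vis, c)).1 ∧
      VisEq n m ((List.range' j len).foldl (stepV fl n i) (vis, c)).1 (vPhi fl i m) ∧
      ((List.range' j len).foldl (stepV fl n i) (vis, c)).2 = c + VsumRow fl i j len := by
  intro len
  induction len with
  | zero =>
    intro j vis c hjm hs hv
    have hj : j = m := by omega
    subst hj
    simpa [VsumRow] using ⟨hs, hv⟩
  | succ len ih =>
    intro j vis c hjm hs hv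
    have hjlt : j < m := by omega
    have hrange : List.range' j (len+1) = j :: List.range' (j+1) len := List.range'_succ ..
    rw [hrange, List.foldl_cons]
    by_cases hd : pvGet fl i j = '|'
    · have hbit : pvGet2 vis i j =
          (decide (0 < i) && runB (fun t => pvGet fl t j) '|' (i-1) i) := by
        rw [hv i j]
        have hnd : ¬ pvGet fl i j = '-' := by rw [hd]; decide
        simp [vPhi, vPhiCol, hin, hjlt, hnd]
      by_cases hb : (decide (0 < i) && runB (fun t => pvGet fl t j) '|' (i-1) i) = true
      · -- run continues from above: A skips the cell, B sees no start
        have hstep : stepV fl n i (vis, c) j = (vis, c) := by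
          unfold stepV
          rw [if_neg]; rintro ⟨-, h2⟩; rw [hbit, hb] at h2; simp at h2
        rw [hstep]
        have hb' := hb
        simp only [Bool.and_eq_true, decide_eq_true_eq] at hb'
        obtain ⟨hi0, hrun⟩ := hb'
        have hb2 : pvGet fl (i-1) j = '|' :=
          runB_head (g := fun t => pvGet fl t j) hrun (by omega)
        have hnext := visEq_congr hv (fun k c _ _ => vPhi_next_cont hd hi0 hb2 k c)
        have hmain := ih (j+1) vis c (by omega) hs hnext
        refine ⟨hmain.1, hmain.2.1, ?_⟩
        rw [hmain.2.2]
        simp [VsumRow, vS_false_of_cont hi0 hb2]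
      · -- a new vertical plank starts here
        have hvisj : pvGet2 vis i j = false := by rw [hbit]; exact Bool.eq_false_iff.mpr hb
        have hstep : stepV fl n i (vis, c) j = (markV fl j i (n - i) vis, c + 1) := by
          unfold stepV; rw [if_pos ⟨hd, hvisj⟩]
        rw [hstep]
        have hs' : Shape n m (markV fl j i (n - i) vis) := markV_shape j (n - i) i vis hs
        have hget := markV_get (fl := fl) (n := n) hjlt (n - i) i vis hs (by omega)
        have hv' : VisEq n m (markV fl j i (n - i) vis) (vPhi fl i (j+1)) := by
          intro k c'
          rw [hget k c']
          by_cases hcond : c' = j ∧ i ≤ k ∧ k < n ∧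
              runB (fun t => pvGet fl t j) '|' i k = true
          · rw [if_pos hcond]
            obtain ⟨hc, hik, hkn, hrun⟩ := hcond
            have hval : vPhi fl i (j+1) k c' = true := by
              rcases Nat.eq_or_lt_of_le hik with heq | hlt
              · simp [vPhi, vPhiCol, hc, show k < i + 1 from by omega]
                exact Or.inr (heq ▸ hd)
              · simp [vPhi, vPhiCol, hc, show ¬ k < i + 1 from by omega]
                exact Or.inr hrun
            simp [hval, hkn, hc ▸ hjlt]
          · rw [if_neg hcond, hv k c']
            by_cases hkn : k < n
            · by_cases hcm2 : c' < m
              · suffices h : vPhi fl i j k c' = vPhi fl i (j+1) k c' by rw [h]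
                by_cases hc : c' = j
                · simp only [hc] at hcond ⊢
                  rcases Nat.lt_trichotomy k i with hk | hk | hk
                  · simp [vPhi, vPhiCol, hk, show k < i + 1 from by omega]
                  · exfalso
                    apply hcond
                    refine ⟨trivial, by omega, hkn, ?_⟩
                    rw [hk]; exact runB_self hd
                  · have hrf : runB (fun t => pvGet fl t j) '|' i k = false := by
                      cases hr : runB (fun t => pvGet fl t j) '|' i k
                      · rfl
                      · exact absurd ⟨trivial, by omega, hkn, hr⟩ hcond
                    have h1 : ¬ k < i := by omega
                    have h2 : ¬ k < i + 1 := by omega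
                    by_cases hi0 : 0 < i
                    · have hold : runB (fun t => pvGet fl t j) '|' (i-1) k = false := by
                        cases hr : runB (fun t => pvGet fl t j) '|' (i-1) k
                        · rfl
                        · have hmono := runB_mono hr
                          rw [show i - 1 + 1 = i from by omega] at hmono
                          rw [hmono] at hrf; simp at hrf
                      simp [vPhi, vPhiCol, h1, h2, hold, hrf]
                    · simp [vPhi, vPhiCol, h1, h2, hrf, hi0]
                · have : (c' < j+1) = (c' < j) := by
                    apply propext; constructor <;> intro h <;> omega
                  simp [vPhi, this]
              · simp [hcm2]
            · simp [hkn]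
        have hmain := ih (j+1) _ (c+1) (by omega) hs' hv'
        refine ⟨hmain.1, hmain.2.1, ?_⟩
        rw [hmain.2.2]
        have hSt : vS fl i j = true := by
          apply vS_true_of_start hd
          rcases Nat.eq_zero_or_pos i with h0 | h0
          · exact Or.inl h0
          · refine Or.inr fun hcontra => hb ?_
            simp only [h0, decide_true, Bool.true_and]
            rw [runB_pair (g := fun t => pvGet fl t j) h0 hd]; simp [hcontra]
        simp [VsumRow, hSt]; ring
    · -- not a pipe: A does nothing, B sees no vertical start
      have hstep : stepV fl n i (vis, c) j = (vis, c) := by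
        unfold stepV; rw [if_neg]; rintro ⟨h1, -⟩; exact hd h1
      rw [hstep]
      have hnext := visEq_congr hv (fun k c _ _ => vPhi_next_skip hd k c)
      have hmain := ih (j+1) vis c (by omega) hs hnext
      refine ⟨hmain.1, hmain.2.1, ?_⟩
      rw [hmain.2.2]
      simp [VsumRow, vS_false_of_npipe hd]
theorem vpass_outer (fl : List String) {n m : Nat} :
    ∀ (len i : Nat) (vis : List (List Bool)) (c : Int), i + len = n → Shape n m vis →
      VisEq n m vis (vPhi fl i 0) →
      Shape n m ((List.range' i len).foldl (rowV fl n m) (vis, c)).1 ∧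
      VisEq n m ((List.range' i len).foldl (rowV fl n m) (vis, c)).1 (vPhi fl n 0) ∧
      ((List.range' i len).foldl (rowV fl n m) (vis, c)).2 = c + VsumRows fl m i len := by
  intro len
  induction len with
  | zero =>
    intro i vis c hin hs hv
    have hi : i = n := by omega
    subst hi
    simpa [VsumRows] using ⟨hs, hv⟩
  | succ len ih =>
    intro i vis c hin hs hv
    have hilt : i < n := by omega
    have hrange : List.range' i (len+1) = i :: List.range' (i+1) len := List.range'_succ ..
    rw [hrange, List.foldl_cons,
      show rowV fl n m (vis, c) i = (List.range m).foldl (stepV fl n i) (vis, c) from rfl]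
    have hv0 : VisEq n m vis (vPhi fl i 0) := hv
    have hrow := vpass_inner fl hilt m 0 vis c (by omega) hs hv0
    have hv1 : VisEq n m ((List.range m).foldl (stepV fl n i) (vis, c)).1 (vPhi fl (i+1) 0) := by
      refine visEq_congr (by rw [List.range_eq_range']; exact hrow.2.1) ?_
      intro k c' _ hcm
      simp [vPhi, hcm]
    have hmain := ih (i+1) ((List.range m).foldl (stepV fl n i) (vis, c)).1
      ((List.range m).foldl (stepV fl n i) (vis, c)).2 (by omega)
      (by rw [List.range_eq_range']; exact hrow.1) hv1
    rw [Prod.mk.eta] at hmain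
    refine ⟨hmain.1, hmain.2.1, ?_⟩
    rw [hmain.2.2]
    rw [show ((List.range m).foldl (stepV fl n i) (vis, c)).2 = c + VsumRow fl i 0 m from by
      rw [List.range_eq_range']; exact hrow.2.2]
    simp [VsumRows]; ring

theorem stepB_split (fl : List String) (i : Nat) (c : Int) (j : Nat) :
    stepB fl i c j =
      c + ((if hS fl i j then (1:Int) else 0) + (if vS fl i j then (1:Int) else 0)) := by
  unfold stepB
  by_cases h1 : hS fl i j = true
  · have hd : pvGet fl i j = '-' := by
      have := h1
      simp only [hS, decide_eq_true_eq] at this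
      exact this.1
    have h2 : vS fl i j = false := vS_false_of_npipe (by rw [hd]; decide)
    simp [h1, h2]
  · have h1' : hS fl i j = false := Bool.eq_false_iff.mpr h1
    by_cases h2 : vS fl i j = true
    · simp [h1', h2]
    · have h2' : vS fl i j = false := Bool.eq_false_iff.mpr h2
      simp [h1', h2']

theorem bpass_row (fl : List String) (i : Nat) :
    ∀ (len j : Nat) (c : Int),
      (List.range' j len).foldl (stepB fl i) c =
        c + (HsumRow fl i j len + VsumRow fl i j len) := by
  intro len
  induction len with
  | zero => intro j c; simp [HsumRow, VsumRow]
  | succ len ih =>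
    intro j c
    rw [List.range'_succ, List.foldl_cons, stepB_split, ih]
    simp [HsumRow, VsumRow]; ring

theorem bpass_outer (fl : List String) (m : Nat) :
    ∀ (len i : Nat) (c : Int),
      (List.range' i len).foldl (rowB fl m) c =
        c + (HsumRows fl m i len + VsumRows fl m i len) := by
  intro len
  induction len with
  | zero => intro i c; simp [HsumRows, VsumRows]
  | succ len ih =>
    intro i c
    rw [List.range'_succ, List.foldl_cons,
      show rowB fl m c i = (List.range m).foldl (stepB fl i) c from rfl,
      List.range_eq_range', bpass_row, ih]
    simp [HsumRows, VsumRows]; ring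

theorem shape_init (n m : Nat) :
    Shape n m ((List.range n).map (fun _ => List.replicate m false)) :=
  ⟨by simp, fun row h => by
    obtain ⟨-, -, rfl⟩ := List.mem_map.mp h
    exact List.length_replicate⟩

theorem get2_init (n m k c : Nat) :
    pvGet2 ((List.range n).map (fun _ => List.replicate m false)) k c = false := by
  rcases Nat.lt_or_ge k n with h | h
  · simp only [pvGet2, List.getD_eq_getElem?_getD, List.getElem?_map, List.getElem?_range, h,
      Option.map_some, Option.getD_some, List.getElem?_replicate]
    split_ifs <;> simp
  · simp [pvGet2, List.getD_eq_getElem?_getD, show ¬ k < n from by omega]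

theorem count_planks_eq (N M : Int) (floor : List String) :
    count_planks N M floor = count_planks_alt N M floor := by
  unfold count_planks count_planks_alt
  set n := N.toNat with hn
  set m := M.toNat with hm
  simp only [List.range_eq_range']
  have hsh : Shape n m ((List.range' 0 n).map (fun _ => List.replicate m false)) := by
    rw [← List.range_eq_range']; exact shape_init n m
  have hv0 : VisEq n m ((List.range' 0 n).map (fun _ => List.replicate m false))
      (rowsPhi floor 0) := by
    intro k c
    rw [← List.range_eq_range', get2_init]
    simp [rowsPhi]
  have hA1 := hpass_outer floor (n := n) (m := m) n 0
    ((List.range' 0 n).map (fun _ => List.replicate m false)) 0 (by omega) hsh hv0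
  have hv1 : VisEq n m
      ((List.range' 0 n).foldl (rowH floor m)
        ((List.range' 0 n).map (fun _ => List.replicate m false), 0)).1
      (vPhi floor 0 0) := by
    refine visEq_congr hA1.2.1 ?_
    intro k c hkn hcm
    simp [rowsPhi, vPhi, vPhiCol, hkn]
  have hA2 := vpass_outer floor (n := n) (m := m) n 0
    ((List.range' 0 n).foldl (rowH floor m)
      ((List.range' 0 n).map (fun _ => List.replicate m false), 0)).1
    ((List.range' 0 n).foldl (rowH floor m)
      ((List.range' 0 n).map (fun _ => List.replicate m false), 0)).2
    (by omega) hA1.1 hv1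
  rw [Prod.mk.eta] at hA2
  rw [hA2.2.2, hA1.2.2, bpass_outer]
  ring

-- ===== VERDICT (by name: the statement is the Claim_ definition above) =====
theorem count_planks_spec : Claim_equal_count_planks := by
  intro N M floor _ _
  unfold Spec_count_planks
  exact count_planks_eq N M floor
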